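-- pv_equiv track=rewrite | github.com/starlight-circuitry/CLSpLi | WordGen.py | allophones
-- ===== SOURCE A (Python) =====
-- def rep(l, let, rp='.'):
--     """
--     :param l: a list of one-letter strings
--     :param let: a one-letter string
--     :param rp: what to replace let with
--     :return: first instance of let replaced with rp
--     """
--     l[l.index(let)] = rp
--
-- def allophones(string):
--     """
--     :param string: a string
--     :return: the string calibrated for allophones in the language
--     """
--     working = list(string)
--     # if working[-1] == 'ð':
--     #     working[-1] = 'θ'
--     while 'Z' in working:
--         rep(working, 'Z', 'ts')
--     # while 't' in working:
--     #     try: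
--     #         if working[working.index('t') + 1] == 'j':
--     #             rep(working, 't', 'tʃ')
--     #         else:
--     #             rep(working, 't')
--     #     except:
--     #         rep(working, 't')
--     # while '.' in working:
--     #     rep(working, '.', 't')
--     # while 't' in working:
--     #     try:
--     #         if working[working.index('t') - 1] == 'i':
--     #             rep(working, 't', 'tʃ')
--     #         else:
--     #             rep(working, 't')
--     #     except:
--     #         rep(working, 't')
--     # while '.' in working:
--     #     rep(working, '.', 't')
--     # while 't' in working:
--     #     try:
--     #         if working[working.index('t') - 1] == 'y':
--     #             rep(working, 't', 'tʃ')
--     #         else: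
--     #             rep(working, 't')
--     #     except:
--     #         rep(working, 't')
--     # while '.' in working:
--     #     rep(working, '.', 't')
--     # while 's' in working:
--     #     try:
--     #         if working[working.index('s') + 1] == 'j':
--     #             rep(working, 's', 'ʃ')
--     #         else:
--     #             rep(working, 's')
--     #     except:
--     #         rep(working, 's')
--     # while '.' in working:
--     #     rep(working, '.', 's')
--     done = ''
--     for j in working:
--         done += j
--     return done
-- ===== SOURCE B (Python) =====
-- def allophones(string):
--     """
--     :param string: a string
--     :return: the string calibrated for allophones in the language
--     """
--     return string.replace('Z', 'ts')
-- ===== Notes on version B (the rewrite author's own statement) =====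
-- stated objective: idiomatic
-- what changed: Replaces the explode-to-list, repeated list.index rescan-and-substitute while loop and character-by-character re-concatenation with a single str.replace pass over the string.
import Mathlib
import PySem

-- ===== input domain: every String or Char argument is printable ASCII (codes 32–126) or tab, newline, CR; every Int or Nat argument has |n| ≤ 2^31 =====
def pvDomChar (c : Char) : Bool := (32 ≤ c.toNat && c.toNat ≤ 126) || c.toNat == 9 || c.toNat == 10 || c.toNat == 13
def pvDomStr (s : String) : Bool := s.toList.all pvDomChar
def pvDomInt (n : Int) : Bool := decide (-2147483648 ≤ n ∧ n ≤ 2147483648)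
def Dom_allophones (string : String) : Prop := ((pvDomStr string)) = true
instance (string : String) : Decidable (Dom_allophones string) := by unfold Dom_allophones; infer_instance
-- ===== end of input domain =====

-- B replaces A's explode-to-list / repeated first-'Z' rescans / re-concatenation loop with one str.replace pass (same return value).

-- ===== PORT A =====
-- rep(l,'Z','ts'): replace the FIRST "Z" in the list with "ts" (in place in Python; functional here)
def repA : List String → List String
  | [] => []
  | s :: t => if s = "Z" then "ts" :: t else s :: repA t

-- each pass removes exactly the first "Z", so the count of "Z" strictly decreases (termination of the while loop)
theorem repA_count_lt (l : List String) (h : "Z" ∈ l) :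
    (repA l).count "Z" < l.count "Z" := by
  induction l with
  | nil => cases h
  | cons s t ih =>
    by_cases hs : s = "Z"
    · subst hs
      simp [repA]
    · have ht : "Z" ∈ t := by
        rcases List.mem_cons.mp h with h' | h'
        · exact absurd h'.symm hs
        · exact h'
      simpa [repA, hs, List.count_cons, Ne.symm hs] using ih ht

-- while 'Z' in working: rep(working, 'Z', 'ts')
def loopA (l : List String) : List String :=
  if h : "Z" ∈ l then loopA (repA l) else l
termination_by l.count "Z"
decreasing_by exact repA_count_lt l h

def allophones (string : String) : String :=
  let working := loopA (string.toList.map (fun c => c.toString))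
  working.foldl (fun acc j => acc ++ j) ""

-- ===== PORT B =====
def allophones_alt (string : String) : String := PySem.Str.replace string "Z" "ts"

-- ===== PRECONDITION & SPEC =====
def Spec_allophones (string : String) (out : String) : Prop := out = allophones_alt string
instance (string : String) (out : String) : Decidable (Spec_allophones string out) := by unfold Spec_allophones; infer_instance

-- ===== CLAIM (what is proved, stated in full; the proofs are below) =====
def Claim_equal_allophones : Prop := ∀ (string : String), Dom_allophones string → Spec_allophones string (allophones string)

-- ===== LEMMAS AND PROOFS =====

def fZ (s : String) : String := if s = "Z" then "ts" else s

theorem map_fZ_repA (l : List String) : (repA l).map fZ = l.map fZ := by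
  induction l with
  | nil => rfl
  | cons s t ih =>
    by_cases hs : s = "Z" <;> simp [repA, hs, fZ, ih]

theorem map_fZ_of_not_mem (l : List String) (h : "Z" ∉ l) : l.map fZ = l := by
  induction l with
  | nil => rfl
  | cons s t ih =>
    simp only [List.mem_cons, not_or] at h
    simp [fZ, Ne.symm h.1, ih h.2]

theorem loopA_eq (l : List String) : loopA l = l.map fZ := by
  induction l using loopA.induct with
  | case1 l h ih => rw [loopA, dif_pos h, ih, map_fZ_repA]
  | case2 l h => rw [loopA, dif_neg h, map_fZ_of_not_mem l h]

theorem foldl_append_toList (l : List String) (acc : String) :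
    (l.foldl (fun a j => a ++ j) acc).toList = acc.toList ++ l.flatMap String.toList := by
  induction l generalizing acc with
  | nil => simp
  | cons s t ih => simp [List.foldl_cons, ih]

theorem toString_eq_Z (c : Char) : (c.toString = "Z") = (c = 'Z') := by
  simp only [eq_iff_iff]
  constructor
  · intro h
    have : c.toString.toList = "Z".toList := by rw [h]
    simpa using this
  · intro h; rw [h]; decide

-- B's single pass over the characters, unfolded: go with enough fuel is the pointwise expansion
theorem replace_go_Z (fuel : Nat) (l : List Char) (acc : List Char) (hf : l.length ≤ fuel) :
    PySem.Chars.replace.go ['Z'] ['t','s'] fuel l acc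
      = acc.reverse ++ l.flatMap (fun c => if c = 'Z' then ['t','s'] else [c]) := by
  induction fuel generalizing l acc with
  | zero =>
    cases l with
    | nil => simp [PySem.Chars.replace.go]
    | cons c t => simp at hf
  | succ n ih =>
    cases l with
    | nil => simp [PySem.Chars.replace.go]
    | cons c t =>
      by_cases hc : c = 'Z'
      · subst hc
        rw [PySem.Chars.replace.go]
        simp only [List.isPrefixOf]
        rw [if_pos (by simp)]
        simp only [List.length_singleton, List.drop_succ_cons, List.drop_zero]
        rw [ih t _ (by simpa using Nat.le_of_succ_le_succ hf)]
        simp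
      · rw [PySem.Chars.replace.go]
        rw [if_neg (by simp [List.isPrefixOf, Ne.symm hc])]
        rw [ih t _ (by simpa using Nat.le_of_succ_le_succ hf)]
        simp [hc]

theorem alt_toList (string : String) :
    (allophones_alt string).toList
      = string.toList.flatMap (fun c => if c = 'Z' then ['t','s'] else [c]) := by
  unfold allophones_alt
  rw [PySem.Str.toList_replace]
  show PySem.Chars.replace string.toList ['Z'] ['t','s'] = _
  rw [PySem.Chars.replace]
  rw [if_neg (by simp)]
  exact replace_go_Z string.toList.length string.toList [] le_rfl

-- ===== VERDICT (by name: the statement is the Claim_ definition above) =====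
theorem allophones_spec : Claim_equal_allophones := by
  intro string _
  show allophones string = allophones_alt string
  apply String.toList_injective
  rw [alt_toList]
  unfold allophones
  simp only
  rw [loopA_eq, foldl_append_toList]
  simp only [String.toList_empty, List.nil_append, List.map_map, List.flatMap_map]
  apply List.flatMap_congr
  intro c _
  simp only [Function.comp, fZ, toString_eq_Z]
  by_cases hc : c = 'Z'
  · subst hc; simp
  · simp [hc]
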